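-- pv_equiv track=rewrite | github.com/SidJain1412/9MensMorris | Main Code/utils.py | removePiece
-- ===== SOURCE A (Python) =====
-- from copy import deepcopy
--
-- def isPlayer(player, board, p1, p2):
--     if (board[p1] == player and board[p2] == player):
--         return True
--     else:
--         return False
--
-- def checkNextMill(position, board, player):
--     mill = [
--         (isPlayer(player, board, 1, 2) or isPlayer(player, board, 3, 5)),
--         (isPlayer(player, board, 0, 2) or isPlayer(player, board, 9, 17)),
--         (isPlayer(player, board, 0, 1) or isPlayer(player, board, 4, 7)),
--         (isPlayer(player, board, 0, 5) or isPlayer(player, board, 11, 19)),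
--         (isPlayer(player, board, 2, 7) or isPlayer(player, board, 12, 20)),
--         (isPlayer(player, board, 0, 3) or isPlayer(player, board, 6, 7)),
--         (isPlayer(player, board, 5, 7) or isPlayer(player, board, 14, 22)),
--         (isPlayer(player, board, 2, 4) or isPlayer(player, board, 5, 6)),
--         (isPlayer(player, board, 9, 10) or isPlayer(player, board, 11, 13)),
--         (isPlayer(player, board, 8, 10) or isPlayer(player, board, 1, 17)),
--         (isPlayer(player, board, 8, 9) or isPlayer(player, board, 12, 15)),
--         (isPlayer(player, board, 3, 19) or isPlayer(player, board, 8, 13)),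
--         (isPlayer(player, board, 20, 4) or isPlayer(player, board, 10, 15)),
--         (isPlayer(player, board, 8, 11) or isPlayer(player, board, 14, 15)),
--         (isPlayer(player, board, 13, 15) or isPlayer(player, board, 6, 22)),
--         (isPlayer(player, board, 13, 14) or isPlayer(player, board, 10, 12)),
--         (isPlayer(player, board, 17, 18) or isPlayer(player, board, 19, 21)),
--         (isPlayer(player, board, 1, 9) or isPlayer(player, board, 16, 18)),
--         (isPlayer(player, board, 16, 17) or isPlayer(player, board, 20, 23)),
--         (isPlayer(player, board, 16, 21) or isPlayer(player, board, 3, 11)),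
--         (isPlayer(player, board, 12, 4) or isPlayer(player, board, 18, 23)),
--         (isPlayer(player, board, 16, 19) or isPlayer(player, board, 22, 23)),
--         (isPlayer(player, board, 6, 14) or isPlayer(player, board, 21, 23)),
--         (isPlayer(player, board, 18, 20) or isPlayer(player, board, 21, 22))
--     ]
--
--     return mill[position]
--
-- def isMill(position, board):
--     p = board[position]
--     # The player on that position
--     if p != 'x':
--         # If there is some player on that position
--         return checkNextMill(position, board, p)
--     else:
--         return False
--
-- def removePiece(board_copy, board_list, player):
--     for i in range(len(board_copy)):
--         if player == '1':
--             opp = '2'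
--         else:
--             opp = '1'
--         if(board_copy[i] == opp):
--             if not isMill(i, board_copy):
--                 new_board = deepcopy(board_copy)
--                 new_board[i] = 'x'
--                 # Making a new board and emptying the position where piece is removed
--                 board_list.append(new_board)
--     return board_list
-- ===== SOURCE B (Python) =====
-- MILL_LINES = [
--     (0, 1, 2), (0, 3, 5), (1, 9, 17), (2, 4, 7),
--     (3, 11, 19), (4, 12, 20), (5, 6, 7), (6, 14, 22),
--     (8, 9, 10), (8, 11, 13), (10, 12, 15), (13, 14, 15),
--     (16, 17, 18), (16, 19, 21), (18, 20, 23), (21, 22, 23),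
-- ]
--
-- def inMill(position, board):
--     p = board[position]
--     return any(all(board[j] == p for j in line)
--                for line in MILL_LINES if position in line)
--
-- def removePiece(board_copy, board_list, player):
--     opp = '2' if player == '1' else '1'
--     board_list.extend(
--         board_copy[:i] + ['x'] + board_copy[i + 1:]
--         for i, c in enumerate(board_copy)
--         if c == opp and not inMill(i, board_copy))
--     return board_list
-- ===== Notes on version B (the rewrite author's own statement) =====
-- stated objective: simpler
-- what changed: A's hardcoded 24-entry per-position table of neighbour pairs (checkNextMill) is replaced by the 16 mill-line triples it encodes, with one generic any/all check over the lines containing the position; the removal loop becomes an enumerate-based comprehension extended onto board_list.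
import Mathlib
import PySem

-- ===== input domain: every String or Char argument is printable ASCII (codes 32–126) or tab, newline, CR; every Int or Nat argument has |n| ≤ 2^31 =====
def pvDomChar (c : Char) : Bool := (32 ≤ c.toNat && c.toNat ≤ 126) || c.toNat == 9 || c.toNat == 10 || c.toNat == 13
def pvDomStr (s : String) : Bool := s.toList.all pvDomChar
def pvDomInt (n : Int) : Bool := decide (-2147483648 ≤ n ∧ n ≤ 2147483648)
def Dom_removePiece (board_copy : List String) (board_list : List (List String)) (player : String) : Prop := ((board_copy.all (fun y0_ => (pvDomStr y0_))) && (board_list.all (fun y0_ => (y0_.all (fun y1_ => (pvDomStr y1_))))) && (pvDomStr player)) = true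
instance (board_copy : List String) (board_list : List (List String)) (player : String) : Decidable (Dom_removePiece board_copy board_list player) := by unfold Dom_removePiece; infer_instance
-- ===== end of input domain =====

-- B replaces A's 24-entry per-position table in checkNextMill by the 16 mill-line triples it encodes
-- (objective: simpler). A mutates board_list in place (append); B performs the same mutation (extend).

-- ===== PORT A =====
-- board[p] is ported as pyGetD board p "" : Python raises IndexError out of range; exactly those inputs are excluded by Pre_.
def isPlayerA (player : String) (board : List String) (p1 p2 : Int) : Bool :=
  if PySem.List.pyGetD board p1 "" == player && PySem.List.pyGetD board p2 "" == player then true else false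

def checkNextMillA (position : Int) (board : List String) (player : String) : Bool :=
  let mill : List Bool := [
    (isPlayerA player board 1 2 || isPlayerA player board 3 5),
    (isPlayerA player board 0 2 || isPlayerA player board 9 17),
    (isPlayerA player board 0 1 || isPlayerA player board 4 7),
    (isPlayerA player board 0 5 || isPlayerA player board 11 19),
    (isPlayerA player board 2 7 || isPlayerA player board 12 20),
    (isPlayerA player board 0 3 || isPlayerA player board 6 7),
    (isPlayerA player board 5 7 || isPlayerA player board 14 22),
    (isPlayerA player board 2 4 || isPlayerA player board 5 6),
    (isPlayerA player board 9 10 || isPlayerA player board 11 13),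
    (isPlayerA player board 8 10 || isPlayerA player board 1 17),
    (isPlayerA player board 8 9 || isPlayerA player board 12 15),
    (isPlayerA player board 3 19 || isPlayerA player board 8 13),
    (isPlayerA player board 20 4 || isPlayerA player board 10 15),
    (isPlayerA player board 8 11 || isPlayerA player board 14 15),
    (isPlayerA player board 13 15 || isPlayerA player board 6 22),
    (isPlayerA player board 13 14 || isPlayerA player board 10 12),
    (isPlayerA player board 17 18 || isPlayerA player board 19 21),
    (isPlayerA player board 1 9 || isPlayerA player board 16 18),
    (isPlayerA player board 16 17 || isPlayerA player board 20 23),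
    (isPlayerA player board 16 21 || isPlayerA player board 3 11),
    (isPlayerA player board 12 4 || isPlayerA player board 18 23),
    (isPlayerA player board 16 19 || isPlayerA player board 22 23),
    (isPlayerA player board 6 14 || isPlayerA player board 21 23),
    (isPlayerA player board 18 20 || isPlayerA player board 21 22)]
  PySem.List.pyGetD mill position false   -- mill[position]; IndexError for position ≥ 24 excluded by Pre_

def isMillA (position : Int) (board : List String) : Bool :=
  let p := PySem.List.pyGetD board position ""
  if p != "x" then checkNextMillA position board p else false

def removePiece (board_copy : List String) (board_list : List (List String)) (player : String) : List (List String) :=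
  (PySem.List.pyRange 0 (board_copy.length : Int) 1).foldl (fun acc i =>
    let opp := if player == "1" then "2" else "1"
    if PySem.List.pyGetD board_copy i "" == opp then
      if !(isMillA i board_copy) then
        -- new_board = deepcopy(board_copy); new_board[i] = 'x' (i is in range, 0 ≤ i)
        acc ++ [board_copy.set i.toNat "x"]
      else acc
    else acc) board_list

-- ===== PORT B =====
def millLinesB : List (List Int) :=
  [[0,1,2],[0,3,5],[1,9,17],[2,4,7],[3,11,19],[4,12,20],[5,6,7],[6,14,22],
   [8,9,10],[8,11,13],[10,12,15],[13,14,15],[16,17,18],[16,19,21],[18,20,23],[21,22,23]]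

def inMillB (position : Int) (board : List String) : Bool :=
  let p := PySem.List.pyGetD board position ""
  millLinesB.any (fun line => line.contains position && line.all (fun j => PySem.List.pyGetD board j "" == p))

def removePiece_alt (board_copy : List String) (board_list : List (List String)) (player : String) : List (List String) :=
  let opp := if player == "1" then "2" else "1"
  board_list ++ (PySem.List.enumerate board_copy).filterMap (fun ic =>
    if ic.2 == opp && !(inMillB ic.1 board_copy) then
      -- board_copy[:i] + ['x'] + board_copy[i+1:]
      some (PySem.List.slice board_copy none (some ic.1) ++ ["x"] ++ PySem.List.slice board_copy (some (ic.1 + 1)) none)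
    else none)

-- ===== PRECONDITION & SPEC =====
-- Pre_ excludes exactly the inputs on which A raises IndexError: any board holding an opponent
-- piece at index ≥ 24 or on a board shorter than 24 (checkNextMill reads board[0..23] and mill[position]).
def Pre_removePiece (board_copy : List String) (board_list : List (List String)) (player : String) : Prop :=
  ∀ i ∈ List.range board_copy.length,
    board_copy.getD i "" = (if player = "1" then "2" else "1") → 24 ≤ board_copy.length ∧ i < 24

instance (board_copy : List String) (board_list : List (List String)) (player : String) : Decidable (Pre_removePiece board_copy board_list player) := by
  unfold Pre_removePiece; infer_instance

def pvWitness_removePiece : List String × List (List String) × String :=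
  (["1","2","x","x","2","x","x","1","x","x","x","x","x","x","x","x","x","x","x","x","x","x","x","x"], [], "1")

def Spec_removePiece (board_copy : List String) (board_list : List (List String)) (player : String) (out : List (List String)) : Prop := out = removePiece_alt board_copy board_list player
instance (board_copy : List String) (board_list : List (List String)) (player : String) (out : List (List String)) : Decidable (Spec_removePiece board_copy board_list player out) := by unfold Spec_removePiece; infer_instance

-- ===== CLAIM (what is proved, stated in full; the proofs are below) =====
def Claim_equal_removePiece : Prop := ∀ (board_copy : List String) (board_list : List (List String)) (player : String), Dom_removePiece board_copy board_list player → Pre_removePiece board_copy board_list player → Spec_removePiece board_copy board_list player (removePiece board_copy board_list player)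

-- ===== LEMMAS AND PROOFS =====

-- the two mill tests agree on any occupied position 0 ≤ k < 24 of the board
set_option maxHeartbeats 2000000 in
lemma mill_eq (bc : List String) (k : Nat) (hk : k < 24) (p : String)
    (hp : PySem.List.pyGetD bc (k : Int) "" = p) (hx : p ≠ "x") :
    isMillA (k : Int) bc = inMillB (k : Int) bc := by
  interval_cases k
  · -- position 0
    norm_cast at hp ⊢
    have hA : isMillA (0 : Int) bc = (isPlayerA p bc 1 2 || isPlayerA p bc 3 5) := by
      simp only [isMillA, hp]; rw [if_pos (by simp [hx])]; rfl
    rw [hA]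
    simp only [isPlayerA, inMillB, millLinesB, List.any_cons, List.any_nil,
      List.all_cons, List.all_nil, List.contains_cons, List.contains_nil]
    cases h1 : (PySem.List.pyGetD bc 1 "" == p) <;>
    cases h2 : (PySem.List.pyGetD bc 2 "" == p) <;>
    cases h3 : (PySem.List.pyGetD bc 3 "" == p) <;>
    cases h5 : (PySem.List.pyGetD bc 5 "" == p) <;> simp_all
  · -- position 1
    norm_cast at hp ⊢
    have hA : isMillA (1 : Int) bc = (isPlayerA p bc 0 2 || isPlayerA p bc 9 17) := by
      simp only [isMillA, hp]; rw [if_pos (by simp [hx])]; rfl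
    rw [hA]
    simp only [isPlayerA, inMillB, millLinesB, List.any_cons, List.any_nil,
      List.all_cons, List.all_nil, List.contains_cons, List.contains_nil]
    cases h0 : (PySem.List.pyGetD bc 0 "" == p) <;>
    cases h2 : (PySem.List.pyGetD bc 2 "" == p) <;>
    cases h9 : (PySem.List.pyGetD bc 9 "" == p) <;>
    cases h17 : (PySem.List.pyGetD bc 17 "" == p) <;> simp_all
  · -- position 2
    norm_cast at hp ⊢
    have hA : isMillA (2 : Int) bc = (isPlayerA p bc 0 1 || isPlayerA p bc 4 7) := by
      simp only [isMillA, hp]; rw [if_pos (by simp [hx])]; rfl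
    rw [hA]
    simp only [isPlayerA, inMillB, millLinesB, List.any_cons, List.any_nil,
      List.all_cons, List.all_nil, List.contains_cons, List.contains_nil]
    cases h0 : (PySem.List.pyGetD bc 0 "" == p) <;>
    cases h1 : (PySem.List.pyGetD bc 1 "" == p) <;>
    cases h4 : (PySem.List.pyGetD bc 4 "" == p) <;>
    cases h7 : (PySem.List.pyGetD bc 7 "" == p) <;> simp_all
  · -- position 3
    norm_cast at hp ⊢
    have hA : isMillA (3 : Int) bc = (isPlayerA p bc 0 5 || isPlayerA p bc 11 19) := by
      simp only [isMillA, hp]; rw [if_pos (by simp [hx])]; rfl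
    rw [hA]
    simp only [isPlayerA, inMillB, millLinesB, List.any_cons, List.any_nil,
      List.all_cons, List.all_nil, List.contains_cons, List.contains_nil]
    cases h0 : (PySem.List.pyGetD bc 0 "" == p) <;>
    cases h5 : (PySem.List.pyGetD bc 5 "" == p) <;>
    cases h11 : (PySem.List.pyGetD bc 11 "" == p) <;>
    cases h19 : (PySem.List.pyGetD bc 19 "" == p) <;> simp_all
  · -- position 4
    norm_cast at hp ⊢
    have hA : isMillA (4 : Int) bc = (isPlayerA p bc 2 7 || isPlayerA p bc 12 20) := by
      simp only [isMillA, hp]; rw [if_pos (by simp [hx])]; rfl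
    rw [hA]
    simp only [isPlayerA, inMillB, millLinesB, List.any_cons, List.any_nil,
      List.all_cons, List.all_nil, List.contains_cons, List.contains_nil]
    cases h2 : (PySem.List.pyGetD bc 2 "" == p) <;>
    cases h7 : (PySem.List.pyGetD bc 7 "" == p) <;>
    cases h12 : (PySem.List.pyGetD bc 12 "" == p) <;>
    cases h20 : (PySem.List.pyGetD bc 20 "" == p) <;> simp_all
  · -- position 5
    norm_cast at hp ⊢
    have hA : isMillA (5 : Int) bc = (isPlayerA p bc 0 3 || isPlayerA p bc 6 7) := by
      simp only [isMillA, hp]; rw [if_pos (by simp [hx])]; rfl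
    rw [hA]
    simp only [isPlayerA, inMillB, millLinesB, List.any_cons, List.any_nil,
      List.all_cons, List.all_nil, List.contains_cons, List.contains_nil]
    cases h0 : (PySem.List.pyGetD bc 0 "" == p) <;>
    cases h3 : (PySem.List.pyGetD bc 3 "" == p) <;>
    cases h6 : (PySem.List.pyGetD bc 6 "" == p) <;>
    cases h7 : (PySem.List.pyGetD bc 7 "" == p) <;> simp_all
  · -- position 6
    norm_cast at hp ⊢
    have hA : isMillA (6 : Int) bc = (isPlayerA p bc 5 7 || isPlayerA p bc 14 22) := by
      simp only [isMillA, hp]; rw [if_pos (by simp [hx])]; rfl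
    rw [hA]
    simp only [isPlayerA, inMillB, millLinesB, List.any_cons, List.any_nil,
      List.all_cons, List.all_nil, List.contains_cons, List.contains_nil]
    cases h5 : (PySem.List.pyGetD bc 5 "" == p) <;>
    cases h7 : (PySem.List.pyGetD bc 7 "" == p) <;>
    cases h14 : (PySem.List.pyGetD bc 14 "" == p) <;>
    cases h22 : (PySem.List.pyGetD bc 22 "" == p) <;> simp_all
  · -- position 7
    norm_cast at hp ⊢
    have hA : isMillA (7 : Int) bc = (isPlayerA p bc 2 4 || isPlayerA p bc 5 6) := by
      simp only [isMillA, hp]; rw [if_pos (by simp [hx])]; rfl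
    rw [hA]
    simp only [isPlayerA, inMillB, millLinesB, List.any_cons, List.any_nil,
      List.all_cons, List.all_nil, List.contains_cons, List.contains_nil]
    cases h2 : (PySem.List.pyGetD bc 2 "" == p) <;>
    cases h4 : (PySem.List.pyGetD bc 4 "" == p) <;>
    cases h5 : (PySem.List.pyGetD bc 5 "" == p) <;>
    cases h6 : (PySem.List.pyGetD bc 6 "" == p) <;> simp_all
  · -- position 8
    norm_cast at hp ⊢
    have hA : isMillA (8 : Int) bc = (isPlayerA p bc 9 10 || isPlayerA p bc 11 13) := by
      simp only [isMillA, hp]; rw [if_pos (by simp [hx])]; rfl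
    rw [hA]
    simp only [isPlayerA, inMillB, millLinesB, List.any_cons, List.any_nil,
      List.all_cons, List.all_nil, List.contains_cons, List.contains_nil]
    cases h9 : (PySem.List.pyGetD bc 9 "" == p) <;>
    cases h10 : (PySem.List.pyGetD bc 10 "" == p) <;>
    cases h11 : (PySem.List.pyGetD bc 11 "" == p) <;>
    cases h13 : (PySem.List.pyGetD bc 13 "" == p) <;> simp_all
  · -- position 9
    norm_cast at hp ⊢
    have hA : isMillA (9 : Int) bc = (isPlayerA p bc 8 10 || isPlayerA p bc 1 17) := by
      simp only [isMillA, hp]; rw [if_pos (by simp [hx])]; rfl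
    rw [hA]
    simp only [isPlayerA, inMillB, millLinesB, List.any_cons, List.any_nil,
      List.all_cons, List.all_nil, List.contains_cons, List.contains_nil]
    cases h1 : (PySem.List.pyGetD bc 1 "" == p) <;>
    cases h8 : (PySem.List.pyGetD bc 8 "" == p) <;>
    cases h10 : (PySem.List.pyGetD bc 10 "" == p) <;>
    cases h17 : (PySem.List.pyGetD bc 17 "" == p) <;> simp_all
  · -- position 10
    norm_cast at hp ⊢
    have hA : isMillA (10 : Int) bc = (isPlayerA p bc 8 9 || isPlayerA p bc 12 15) := by
      simp only [isMillA, hp]; rw [if_pos (by simp [hx])]; rfl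
    rw [hA]
    simp only [isPlayerA, inMillB, millLinesB, List.any_cons, List.any_nil,
      List.all_cons, List.all_nil, List.contains_cons, List.contains_nil]
    cases h8 : (PySem.List.pyGetD bc 8 "" == p) <;>
    cases h9 : (PySem.List.pyGetD bc 9 "" == p) <;>
    cases h12 : (PySem.List.pyGetD bc 12 "" == p) <;>
    cases h15 : (PySem.List.pyGetD bc 15 "" == p) <;> simp_all
  · -- position 11
    norm_cast at hp ⊢
    have hA : isMillA (11 : Int) bc = (isPlayerA p bc 3 19 || isPlayerA p bc 8 13) := by
      simp only [isMillA, hp]; rw [if_pos (by simp [hx])]; rfl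
    rw [hA]
    simp only [isPlayerA, inMillB, millLinesB, List.any_cons, List.any_nil,
      List.all_cons, List.all_nil, List.contains_cons, List.contains_nil]
    cases h3 : (PySem.List.pyGetD bc 3 "" == p) <;>
    cases h8 : (PySem.List.pyGetD bc 8 "" == p) <;>
    cases h13 : (PySem.List.pyGetD bc 13 "" == p) <;>
    cases h19 : (PySem.List.pyGetD bc 19 "" == p) <;> simp_all
  · -- position 12
    norm_cast at hp ⊢
    have hA : isMillA (12 : Int) bc = (isPlayerA p bc 20 4 || isPlayerA p bc 10 15) := by
      simp only [isMillA, hp]; rw [if_pos (by simp [hx])]; rfl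
    rw [hA]
    simp only [isPlayerA, inMillB, millLinesB, List.any_cons, List.any_nil,
      List.all_cons, List.all_nil, List.contains_cons, List.contains_nil]
    cases h4 : (PySem.List.pyGetD bc 4 "" == p) <;>
    cases h10 : (PySem.List.pyGetD bc 10 "" == p) <;>
    cases h15 : (PySem.List.pyGetD bc 15 "" == p) <;>
    cases h20 : (PySem.List.pyGetD bc 20 "" == p) <;> simp_all
  · -- position 13
    norm_cast at hp ⊢
    have hA : isMillA (13 : Int) bc = (isPlayerA p bc 8 11 || isPlayerA p bc 14 15) := by
      simp only [isMillA, hp]; rw [if_pos (by simp [hx])]; rfl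
    rw [hA]
    simp only [isPlayerA, inMillB, millLinesB, List.any_cons, List.any_nil,
      List.all_cons, List.all_nil, List.contains_cons, List.contains_nil]
    cases h8 : (PySem.List.pyGetD bc 8 "" == p) <;>
    cases h11 : (PySem.List.pyGetD bc 11 "" == p) <;>
    cases h14 : (PySem.List.pyGetD bc 14 "" == p) <;>
    cases h15 : (PySem.List.pyGetD bc 15 "" == p) <;> simp_all
  · -- position 14
    norm_cast at hp ⊢
    have hA : isMillA (14 : Int) bc = (isPlayerA p bc 13 15 || isPlayerA p bc 6 22) := by
      simp only [isMillA, hp]; rw [if_pos (by simp [hx])]; rfl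
    rw [hA]
    simp only [isPlayerA, inMillB, millLinesB, List.any_cons, List.any_nil,
      List.all_cons, List.all_nil, List.contains_cons, List.contains_nil]
    cases h6 : (PySem.List.pyGetD bc 6 "" == p) <;>
    cases h13 : (PySem.List.pyGetD bc 13 "" == p) <;>
    cases h15 : (PySem.List.pyGetD bc 15 "" == p) <;>
    cases h22 : (PySem.List.pyGetD bc 22 "" == p) <;> simp_all
  · -- position 15
    norm_cast at hp ⊢
    have hA : isMillA (15 : Int) bc = (isPlayerA p bc 13 14 || isPlayerA p bc 10 12) := by
      simp only [isMillA, hp]; rw [if_pos (by simp [hx])]; rfl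
    rw [hA]
    simp only [isPlayerA, inMillB, millLinesB, List.any_cons, List.any_nil,
      List.all_cons, List.all_nil, List.contains_cons, List.contains_nil]
    cases h10 : (PySem.List.pyGetD bc 10 "" == p) <;>
    cases h12 : (PySem.List.pyGetD bc 12 "" == p) <;>
    cases h13 : (PySem.List.pyGetD bc 13 "" == p) <;>
    cases h14 : (PySem.List.pyGetD bc 14 "" == p) <;> simp_all
  · -- position 16
    norm_cast at hp ⊢
    have hA : isMillA (16 : Int) bc = (isPlayerA p bc 17 18 || isPlayerA p bc 19 21) := by
      simp only [isMillA, hp]; rw [if_pos (by simp [hx])]; rfl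
    rw [hA]
    simp only [isPlayerA, inMillB, millLinesB, List.any_cons, List.any_nil,
      List.all_cons, List.all_nil, List.contains_cons, List.contains_nil]
    cases h17 : (PySem.List.pyGetD bc 17 "" == p) <;>
    cases h18 : (PySem.List.pyGetD bc 18 "" == p) <;>
    cases h19 : (PySem.List.pyGetD bc 19 "" == p) <;>
    cases h21 : (PySem.List.pyGetD bc 21 "" == p) <;> simp_all
  · -- position 17
    norm_cast at hp ⊢
    have hA : isMillA (17 : Int) bc = (isPlayerA p bc 1 9 || isPlayerA p bc 16 18) := by
      simp only [isMillA, hp]; rw [if_pos (by simp [hx])]; rfl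
    rw [hA]
    simp only [isPlayerA, inMillB, millLinesB, List.any_cons, List.any_nil,
      List.all_cons, List.all_nil, List.contains_cons, List.contains_nil]
    cases h1 : (PySem.List.pyGetD bc 1 "" == p) <;>
    cases h9 : (PySem.List.pyGetD bc 9 "" == p) <;>
    cases h16 : (PySem.List.pyGetD bc 16 "" == p) <;>
    cases h18 : (PySem.List.pyGetD bc 18 "" == p) <;> simp_all
  · -- position 18
    norm_cast at hp ⊢
    have hA : isMillA (18 : Int) bc = (isPlayerA p bc 16 17 || isPlayerA p bc 20 23) := by
      simp only [isMillA, hp]; rw [if_pos (by simp [hx])]; rfl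
    rw [hA]
    simp only [isPlayerA, inMillB, millLinesB, List.any_cons, List.any_nil,
      List.all_cons, List.all_nil, List.contains_cons, List.contains_nil]
    cases h16 : (PySem.List.pyGetD bc 16 "" == p) <;>
    cases h17 : (PySem.List.pyGetD bc 17 "" == p) <;>
    cases h20 : (PySem.List.pyGetD bc 20 "" == p) <;>
    cases h23 : (PySem.List.pyGetD bc 23 "" == p) <;> simp_all
  · -- position 19
    norm_cast at hp ⊢
    have hA : isMillA (19 : Int) bc = (isPlayerA p bc 16 21 || isPlayerA p bc 3 11) := by
      simp only [isMillA, hp]; rw [if_pos (by simp [hx])]; rfl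
    rw [hA]
    simp only [isPlayerA, inMillB, millLinesB, List.any_cons, List.any_nil,
      List.all_cons, List.all_nil, List.contains_cons, List.contains_nil]
    cases h3 : (PySem.List.pyGetD bc 3 "" == p) <;>
    cases h11 : (PySem.List.pyGetD bc 11 "" == p) <;>
    cases h16 : (PySem.List.pyGetD bc 16 "" == p) <;>
    cases h21 : (PySem.List.pyGetD bc 21 "" == p) <;> simp_all
  · -- position 20
    norm_cast at hp ⊢
    have hA : isMillA (20 : Int) bc = (isPlayerA p bc 12 4 || isPlayerA p bc 18 23) := by
      simp only [isMillA, hp]; rw [if_pos (by simp [hx])]; rfl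
    rw [hA]
    simp only [isPlayerA, inMillB, millLinesB, List.any_cons, List.any_nil,
      List.all_cons, List.all_nil, List.contains_cons, List.contains_nil]
    cases h4 : (PySem.List.pyGetD bc 4 "" == p) <;>
    cases h12 : (PySem.List.pyGetD bc 12 "" == p) <;>
    cases h18 : (PySem.List.pyGetD bc 18 "" == p) <;>
    cases h23 : (PySem.List.pyGetD bc 23 "" == p) <;> simp_all
  · -- position 21
    norm_cast at hp ⊢
    have hA : isMillA (21 : Int) bc = (isPlayerA p bc 16 19 || isPlayerA p bc 22 23) := by
      simp only [isMillA, hp]; rw [if_pos (by simp [hx])]; rfl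
    rw [hA]
    simp only [isPlayerA, inMillB, millLinesB, List.any_cons, List.any_nil,
      List.all_cons, List.all_nil, List.contains_cons, List.contains_nil]
    cases h16 : (PySem.List.pyGetD bc 16 "" == p) <;>
    cases h19 : (PySem.List.pyGetD bc 19 "" == p) <;>
    cases h22 : (PySem.List.pyGetD bc 22 "" == p) <;>
    cases h23 : (PySem.List.pyGetD bc 23 "" == p) <;> simp_all
  · -- position 22
    norm_cast at hp ⊢
    have hA : isMillA (22 : Int) bc = (isPlayerA p bc 6 14 || isPlayerA p bc 21 23) := by
      simp only [isMillA, hp]; rw [if_pos (by simp [hx])]; rfl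
    rw [hA]
    simp only [isPlayerA, inMillB, millLinesB, List.any_cons, List.any_nil,
      List.all_cons, List.all_nil, List.contains_cons, List.contains_nil]
    cases h6 : (PySem.List.pyGetD bc 6 "" == p) <;>
    cases h14 : (PySem.List.pyGetD bc 14 "" == p) <;>
    cases h21 : (PySem.List.pyGetD bc 21 "" == p) <;>
    cases h23 : (PySem.List.pyGetD bc 23 "" == p) <;> simp_all
  · -- position 23
    norm_cast at hp ⊢
    have hA : isMillA (23 : Int) bc = (isPlayerA p bc 18 20 || isPlayerA p bc 21 22) := by
      simp only [isMillA, hp]; rw [if_pos (by simp [hx])]; rfl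
    rw [hA]
    simp only [isPlayerA, inMillB, millLinesB, List.any_cons, List.any_nil,
      List.all_cons, List.all_nil, List.contains_cons, List.contains_nil]
    cases h18 : (PySem.List.pyGetD bc 18 "" == p) <;>
    cases h20 : (PySem.List.pyGetD bc 20 "" == p) <;>
    cases h21 : (PySem.List.pyGetD bc 21 "" == p) <;>
    cases h22 : (PySem.List.pyGetD bc 22 "" == p) <;> simp_all


lemma filter_map_eq_filterMap (l : List Int) (c : Int → Bool) (f : Int → List String) :
    (l.filter c).map f = l.filterMap (fun i => if c i then some (f i) else none) := by
  induction l with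
  | nil => rfl
  | cons a t ih => by_cases h : c a <;> simp [h, ih]

-- ===== VERDICT (by name: the statement is the Claim_ definition above) =====
theorem removePiece_spec : Claim_equal_removePiece := by
  intro bc bl pl hdom hpre
  unfold Spec_removePiece removePiece removePiece_alt
  set opp : String := if pl == "1" then "2" else "1" with hopp
  have hoppx : opp ≠ "x" := by rw [hopp]; split <;> decide
  have hbody : (fun (acc : List (List String)) (i : Int) =>
      if PySem.List.pyGetD bc i "" == opp then
        if !(isMillA i bc) then acc ++ [bc.set i.toNat "x"] else acc
      else acc)
      = fun acc i => if (PySem.List.pyGetD bc i "" == opp && !(isMillA i bc)) then acc ++ [bc.set i.toNat "x"] else acc := by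
    funext acc i
    cases h1 : (PySem.List.pyGetD bc i "" == opp) <;> cases h2 : isMillA i bc <;> simp_all
  simp only [hbody]
  rw [PySem.List.foldl_append_if]
  rw [PySem.List.enumerate_eq_map_pyRange (d := "")]
  rw [List.filterMap_map]
  congr 1
  rw [PySem.List.len_eq]
  rw [filter_map_eq_filterMap]
  apply List.filterMap_congr
  intro i hi
  have hmem := (PySem.List.mem_pyRange_one).mp hi
  obtain ⟨h0, hlt⟩ := hmem
  obtain ⟨k, rfl⟩ : ∃ k : Nat, i = (k : Int) := ⟨i.toNat, by omega⟩
  have hklen : k < bc.length := by omega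
  simp only [Function.comp]
  by_cases h : (PySem.List.pyGetD bc (k : Int) "" == opp) = true
  · -- opponent piece at k : Pre_ gives the bounds, mill tests agree, set = slices
    have hget : bc.getD k "" = opp := by
      have := PySem.List.pyGetD_natCast (xs := bc) (n := k) (d := "")
      rw [this] at h; exact eq_of_beq h
    have hpre' := hpre k (List.mem_range.mpr hklen) (by
      rw [hget, hopp]; split <;> simp_all)
    obtain ⟨hlen24, hk24⟩ := hpre'
    have hmill := mill_eq bc k hk24 opp (by rw [PySem.List.pyGetD_natCast]; exact hget) hoppx
    rw [hmill]
    by_cases hm : inMillB (k : Int) bc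
    · simp [hm]
    · have hset : bc.set (((k : Int)).toNat) "x"
          = PySem.List.slice bc none (some (k : Int)) ++ ["x"] ++ PySem.List.slice bc (some ((k : Int) + 1)) none := by
        rw [PySem.List.slice_to_natCast]
        have h1 : ((k : Int) + 1) = ((k + 1 : Nat) : Int) := by push_cast; ring
        rw [h1, PySem.List.slice_from_natCast]
        simp [List.set_eq_take_append_cons_drop, hklen, Int.toNat_natCast]
      simp only [Int.toNat_natCast] at hset ⊢
      simp [hm, hset]
  · have h' : ¬ (bc[k]?.getD "" = opp) := by simpa using h
    simp [h']
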